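-- pv_equiv track=rewrite | github.com/YuvalMad110/Gen-RIR-Diffusion | RIRDiffusionModel.py | _find_optimal_norm_groups
-- ===== SOURCE A (Python) =====
-- from typing import List, Tuple, Optional, Union
--
-- def _find_optimal_norm_groups(channels: Tuple[int, ...]) -> int:
--     """Find the optimal number of groups for GroupNorm that divides all channel dimensions."""
--     import math
--
--     # Find GCD of all channel dimensions
--     result = channels[0]
--     for ch in channels[1:]:
--         result = math.gcd(result, ch)
--
--     # Common group sizes in order of preference
--     preferred_groups = [32, 16, 8, 4, 2, 1]
--
--     for groups in preferred_groups:
--         if result >= groups and result % groups == 0: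
--             # Check if this divides all channels
--             if all(ch % groups == 0 for ch in channels):
--                 return groups
--
--     return 1  # Fallback to 1 (equivalent to LayerNorm)
-- ===== SOURCE B (Python) =====
-- import math
--
-- def _find_optimal_norm_groups(channels):
--     """Find the optimal number of groups for GroupNorm that divides all channel dimensions."""
--     g = channels[0]
--     for ch in channels[1:]:
--         g = math.gcd(g, ch)
--     # the preferred groups 32,16,8,4,2,1 are exactly the divisors of 32, so the first
--     # (largest) one dividing all channels is gcd(32, g); a nonpositive g (degenerate
--     # channel tuples) falls through to the fallback 1, as in the preference scan
--     return math.gcd(32, g) if g > 0 else 1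
-- ===== Notes on version B (the rewrite author's own statement) =====
-- stated objective: simpler
-- what changed: B replaces A's six-candidate preference scan (each candidate re-tested with an inner all-channels divisibility pass) by the closed form gcd(32, g) of the running channel gcd g, keeping A's fallback of 1 when g is not positive.
import Mathlib
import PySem

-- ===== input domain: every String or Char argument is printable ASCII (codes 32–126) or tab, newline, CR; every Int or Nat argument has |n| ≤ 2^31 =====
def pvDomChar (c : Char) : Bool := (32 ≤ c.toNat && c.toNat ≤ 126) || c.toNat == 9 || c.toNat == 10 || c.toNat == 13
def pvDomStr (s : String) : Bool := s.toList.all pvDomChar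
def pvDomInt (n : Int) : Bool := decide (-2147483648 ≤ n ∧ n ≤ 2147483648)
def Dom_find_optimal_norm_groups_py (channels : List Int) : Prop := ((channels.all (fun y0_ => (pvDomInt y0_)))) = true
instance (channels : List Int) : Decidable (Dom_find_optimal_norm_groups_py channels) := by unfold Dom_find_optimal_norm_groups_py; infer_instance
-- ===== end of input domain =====

-- B replaces A's six-candidate preference scan (with its inner all-divide re-checks) by the
-- closed form gcd(32, g) of the running channel gcd g — simpler, same values everywhere A returns.

-- ===== PORT A =====
-- the preference scan of A: for each g, 'if result >= g and result % g == 0: if all(...): return g'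
def loopA_find (channels : List Int) (result : Int) : List Int → Int
  | [] => 1  -- fallthrough: 'return 1'
  | g :: gs =>
      if result ≥ g ∧ PySem.Int.mod result g = 0 then
        if channels.all (fun ch => PySem.Int.mod ch g == 0) then g
        else loopA_find channels result gs
      else loopA_find channels result gs

def find_optimal_norm_groups_py (channels : List Int) : Int :=
  -- 'result = channels[0]': IndexError on [], excluded by Pre_; .getD 0 is a dummy there
  let r0 : Int := (PySem.List.pyGet? channels 0).getD 0
  -- 'for ch in channels[1:]: result = math.gcd(result, ch)'
  let result : Int := (PySem.List.slice channels (some 1) none).foldl (fun a ch => (Int.gcd a ch : Int)) r0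
  loopA_find channels result [32, 16, 8, 4, 2, 1]

-- ===== PORT B =====
def find_optimal_norm_groups_py_alt (channels : List Int) : Int :=
  -- 'g = channels[0]; for ch in channels[1:]: g = math.gcd(g, ch)'  (IndexError on [], excluded by Pre_)
  let g : Int := (PySem.List.slice channels (some 1) none).foldl (fun a ch => (Int.gcd a ch : Int))
    ((PySem.List.pyGet? channels 0).getD 0)
  -- 'return math.gcd(32, g) if g > 0 else 1'
  if 0 < g then (Int.gcd 32 g : Int) else 1

-- ===== PRECONDITION & SPEC =====
-- Pre_ excludes only the empty tuple, on which both A and B raise IndexError at channels[0].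
def Pre_find_optimal_norm_groups_py (channels : List Int) : Prop := channels ≠ []
instance (channels : List Int) : Decidable (Pre_find_optimal_norm_groups_py channels) := by
  unfold Pre_find_optimal_norm_groups_py; infer_instance
def pvWitness_find_optimal_norm_groups_py : List Int := [64, 32]

def Spec_find_optimal_norm_groups_py (channels : List Int) (out : Int) : Prop :=
  out = find_optimal_norm_groups_py_alt channels
instance (channels : List Int) (out : Int) : Decidable (Spec_find_optimal_norm_groups_py channels out) := by
  unfold Spec_find_optimal_norm_groups_py; infer_instance

-- ===== CLAIM =====
def Claim_equal_find_optimal_norm_groups_py : Prop := ∀ (channels : List Int), Dom_find_optimal_norm_groups_py channels → Pre_find_optimal_norm_groups_py channels → Spec_find_optimal_norm_groups_py channels (find_optimal_norm_groups_py channels)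

-- ===== LEMMAS AND PROOFS =====

-- divisors of the running-GCD fold are exactly the common divisors
lemma dvd_gcdFold_iff (rest : List Int) (c g : Int) :
    g ∣ rest.foldl (fun a ch => (Int.gcd a ch : Int)) c ↔ (g ∣ c ∧ ∀ ch ∈ rest, g ∣ ch) := by
  induction rest generalizing c with
  | nil => simp
  | cons b rest ih =>
      simp only [List.foldl_cons, ih, List.mem_cons, Int.dvd_coe_gcd_iff]
      constructor
      · rintro ⟨⟨hc, hb⟩, hall⟩
        exact ⟨hc, fun ch h => h.elim (fun e => e ▸ hb) (hall ch)⟩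
      · rintro ⟨hc, hall⟩
        exact ⟨⟨hc, hall b (Or.inl rfl)⟩, fun ch h => hall ch (Or.inr h)⟩

-- Bool all-check ↔ divisibility of every channel
lemma all_mod_iff (channels : List Int) (g : Int) :
    (channels.all (fun ch => PySem.Int.mod ch g == 0)) = true ↔ ∀ ch ∈ channels, g ∣ ch := by
  simp [List.all_eq_true, PySem.Int.mod_eq_zero_iff_dvd]

-- with a nonpositive gcd A's guard 'result >= groups' never fires
lemma loopA_of_nonpos (channels : List Int) (r : Int) (hr : r ≤ 0) :
    ∀ gs : List Int, (∀ g ∈ gs, 0 < g) → loopA_find channels r gs = 1 := by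
  intro gs hpos
  induction gs with
  | nil => rfl
  | cons g gs ih =>
      have hg : 0 < g := hpos g (by simp)
      have : ¬ (r ≥ g ∧ PySem.Int.mod r g = 0) := by
        rintro ⟨h, -⟩; omega
      simp [loopA_find, this, ih (fun g' h => hpos g' (by simp [h]))]

-- first candidate dividing g (proof-only characterisation of A's scan)
def firstDvd (g : Int) : List Int → Int
  | [] => 1
  | c :: cs => if c ∣ g then c else firstDvd g cs

-- when g is a common divisor of all channels, A's scan returns the first candidate dividing g
lemma loopA_eq_firstDvd (channels : List Int) (g : Int) (hg : 0 < g)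
    (hdvd : ∀ ch ∈ channels, g ∣ ch) :
    ∀ gs : List Int, (∀ c ∈ gs, 0 < c) → loopA_find channels g gs = firstDvd g gs := by
  intro gs hpos
  induction gs with
  | nil => rfl
  | cons c cs ih =>
      have ih' := ih (fun c' h => hpos c' (by simp [h]))
      by_cases hc : c ∣ g
      · have hall : (channels.all (fun ch => PySem.Int.mod ch c == 0)) = true :=
          (all_mod_iff channels c).mpr (fun ch h => hc.trans (hdvd ch h))
        rw [loopA_find, if_pos ⟨Int.le_of_dvd hg hc, (PySem.Int.mod_eq_zero_iff_dvd g c).mpr hc⟩,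
          if_pos hall, firstDvd, if_pos hc]
      · have hguard : ¬ (g ≥ c ∧ PySem.Int.mod g c = 0) := fun h =>
          hc ((PySem.Int.mod_eq_zero_iff_dvd g c).mp h.2)
        rw [loopA_find, if_neg hguard, firstDvd, if_neg hc, ih']

lemma dvd32_cases (d : Nat) (h : d ∣ 32) :
    d = 1 ∨ d = 2 ∨ d = 4 ∨ d = 8 ∨ d = 16 ∨ d = 32 := by
  have := Nat.le_of_dvd (by norm_num) h
  interval_cases d <;> omega

lemma gcd32_eq (g : Int) (c : Nat) (hcg : (c : Int) ∣ g) (hc32 : c ∣ 32)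
    (hmax : ∀ d : Nat, d ∣ 32 → (d : Int) ∣ g → d ≤ c) : Int.gcd 32 g = c := by
  have h1 : (↑(Int.gcd 32 g) : Int) ∣ 32 := Int.gcd_dvd_left 32 g
  have h1' : Int.gcd 32 g ∣ 32 := by exact_mod_cast h1
  have h2 : (↑(Int.gcd 32 g) : Int) ∣ g := Int.gcd_dvd_right 32 g
  have hc32' : (c : Int) ∣ 32 := by exact_mod_cast hc32
  have h3' : c ∣ Int.gcd 32 g := by exact_mod_cast Int.dvd_gcd hc32' hcg
  have hle : Int.gcd 32 g ≤ c := hmax _ h1' h2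
  have hpos : 0 < Int.gcd 32 g := Nat.pos_of_ne_zero (by
    intro h; rw [h] at h1'; simp at h1')
  have := Nat.le_of_dvd hpos h3'
  omega

-- the first of 32,16,8,4,2,1 dividing g is gcd(32, g)
lemma firstDvd_closed (g : Int) :
    firstDvd g [32, 16, 8, 4, 2, 1] = (Int.gcd 32 g : Int) := by
  by_cases h32 : (32 : Int) ∣ g
  · rw [firstDvd, if_pos h32,
      gcd32_eq g 32 h32 (by norm_num) (fun d hd _ => Nat.le_of_dvd (by norm_num) hd)]
    norm_num
  · rw [firstDvd, if_neg h32]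
    by_cases h16 : (16 : Int) ∣ g
    · rw [firstDvd, if_pos h16, gcd32_eq g 16 h16 (by norm_num) ?_]
      · norm_num
      · intro d hd hdg
        rcases dvd32_cases d hd with rfl | rfl | rfl | rfl | rfl | rfl
        · omega
        · omega
        · omega
        · omega
        · omega
        · exact absurd (by exact_mod_cast hdg) h32
    · rw [firstDvd, if_neg h16]
      by_cases h8 : (8 : Int) ∣ g
      · rw [firstDvd, if_pos h8, gcd32_eq g 8 h8 (by norm_num) ?_]
        · norm_num
        · intro d hd hdg
          rcases dvd32_cases d hd with rfl | rfl | rfl | rfl | rfl | rfl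
          · omega
          · omega
          · omega
          · omega
          · exact absurd (by exact_mod_cast hdg) h16
          · exact absurd (by exact_mod_cast hdg) h32
      · rw [firstDvd, if_neg h8]
        by_cases h4 : (4 : Int) ∣ g
        · rw [firstDvd, if_pos h4, gcd32_eq g 4 h4 (by norm_num) ?_]
          · norm_num
          · intro d hd hdg
            rcases dvd32_cases d hd with rfl | rfl | rfl | rfl | rfl | rfl
            · omega
            · omega
            · omega
            · exact absurd (by exact_mod_cast hdg) h8
            · exact absurd (by exact_mod_cast hdg) h16
            · exact absurd (by exact_mod_cast hdg) h32
        · rw [firstDvd, if_neg h4]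
          by_cases h2 : (2 : Int) ∣ g
          · rw [firstDvd, if_pos h2, gcd32_eq g 2 h2 (by norm_num) ?_]
            · norm_num
            · intro d hd hdg
              rcases dvd32_cases d hd with rfl | rfl | rfl | rfl | rfl | rfl
              · omega
              · omega
              · exact absurd (by exact_mod_cast hdg) h4
              · exact absurd (by exact_mod_cast hdg) h8
              · exact absurd (by exact_mod_cast hdg) h16
              · exact absurd (by exact_mod_cast hdg) h32
          · rw [firstDvd, if_neg h2, firstDvd, if_pos (one_dvd g),
              gcd32_eq g 1 (one_dvd g) (by norm_num) ?_]
            · norm_num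
            · intro d hd hdg
              rcases dvd32_cases d hd with rfl | rfl | rfl | rfl | rfl | rfl
              · omega
              · exact absurd (by exact_mod_cast hdg) h2
              · exact absurd (by exact_mod_cast hdg) h4
              · exact absurd (by exact_mod_cast hdg) h8
              · exact absurd (by exact_mod_cast hdg) h16
              · exact absurd (by exact_mod_cast hdg) h32

-- A on a nonempty list, unfolded to the scan over the gcd of all channels
lemma portA_eq (c : Int) (rest : List Int) :
    find_optimal_norm_groups_py (c :: rest)
      = loopA_find (c :: rest) (rest.foldl (fun a ch => (Int.gcd a ch : Int)) c) [32, 16, 8, 4, 2, 1] := by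
  simp [find_optimal_norm_groups_py, PySem.List.pyGet?, PySem.List.pyIdx?, PySem.List.slice_from_one]

-- B on a nonempty list, unfolded to the closed form over the same gcd
lemma portB_eq (c : Int) (rest : List Int) :
    find_optimal_norm_groups_py_alt (c :: rest)
      = (if 0 < rest.foldl (fun a ch => (Int.gcd a ch : Int)) c
          then ((Int.gcd 32 (rest.foldl (fun a ch => (Int.gcd a ch : Int)) c) : Nat) : Int) else 1) := by
  simp [find_optimal_norm_groups_py_alt, PySem.List.pyGet?, PySem.List.pyIdx?, PySem.List.slice_from_one]

-- ===== VERDICT =====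
theorem find_optimal_norm_groups_py_spec : Claim_equal_find_optimal_norm_groups_py := by
  intro channels _ hpre
  unfold Spec_find_optimal_norm_groups_py
  match channels with
  | [] => exact absurd rfl hpre
  | c :: rest =>
    rw [portA_eq, portB_eq]
    by_cases hg : 0 < rest.foldl (fun a ch => (Int.gcd a ch : Int)) c
    · rw [if_pos hg, ← firstDvd_closed]
      refine loopA_eq_firstDvd (c :: rest) _ hg ?_ _ (by decide)
      have h := (dvd_gcdFold_iff rest c _).mp (dvd_refl _)
      intro ch hch
      rcases List.mem_cons.mp hch with rfl | hmem
      · exact h.1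
      · exact h.2 ch hmem
    · rw [if_neg hg]
      exact loopA_of_nonpos _ _ (by omega) _ (by decide)
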